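-- pv_equiv track=rewrite | github.com/hellolol2016/advent-of-code-2023 | day1/test.py | get_rightmost_digit
-- ===== SOURCE A (Python) =====
-- from collections import namedtuple
--
-- IndexValueTuple = namedtuple('IndexValueTuple', ['index', 'value'])
--
-- def get_rightmost_digit(string: str) -> IndexValueTuple:
--     '''Returns the IndexValueTuple of the rightmost digit'''
--     highest = len(string)
--     value = None
--     for i in range(len(string) - 1, -1, -1):
--         if string[i].isdigit():
--             highest = i
--             value = int(string[i])
--             break
--     return IndexValueTuple(highest, value)
-- ===== SOURCE B (Python) =====
-- from collections import namedtuple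
--
-- IndexValueTuple = namedtuple('IndexValueTuple', ['index', 'value'])
--
-- def get_rightmost_digit(string: str) -> IndexValueTuple:
--     '''Returns the IndexValueTuple of the rightmost digit'''
--     last = None
--     for i, ch in enumerate(string):
--         if ch.isdigit():
--             last = i
--     if last is None:
--         return IndexValueTuple(len(string), None)
--     return IndexValueTuple(last, int(string[last]))
-- ===== Notes on version B (the rewrite author's own statement) =====
-- stated objective: alternative
-- what changed: Replaces the backward index loop with break by a single forward enumerate scan that keeps the index of the most recent digit and converts it once after the loop.
import Mathlib
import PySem

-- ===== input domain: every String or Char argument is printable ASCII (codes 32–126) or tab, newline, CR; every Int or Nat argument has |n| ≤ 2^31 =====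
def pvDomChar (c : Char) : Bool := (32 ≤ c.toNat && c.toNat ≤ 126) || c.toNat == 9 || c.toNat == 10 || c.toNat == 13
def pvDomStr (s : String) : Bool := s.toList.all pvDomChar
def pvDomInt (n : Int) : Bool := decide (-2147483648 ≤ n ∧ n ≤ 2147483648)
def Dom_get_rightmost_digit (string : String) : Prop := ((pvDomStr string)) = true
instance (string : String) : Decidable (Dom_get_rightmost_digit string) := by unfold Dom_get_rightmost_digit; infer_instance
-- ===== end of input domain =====

-- B: a single forward enumerate scan keeping the last digit's index, converting once after the loop (alternative decomposition; same cost).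
-- ===== PORT A =====
-- countdown loop 'for i in range(len-1, -1, -1)' with break, encoded as recursion on the
-- number of indices left to visit; base case = loop exhausted, returning the initial
-- highest = len(string), value = None.
def pvAGo (cs : List Char) : Nat → Int × Option Int
  | 0 => ((cs.length : Int), none)
  | Nat.succ k =>
      let i : Int := (k : Int)
      let c := PySem.List.pyGetD cs i ' '
      if PySem.Chars.isdigit c then
        -- int(string[i]): under the isdigit guard on the ASCII domain c is '0'..'9', so
        -- ofChars? is some and the .getD 0 default is never used (exact on Dom).
        (i, (PySem.Int.ofChars? [c]).getD 0)
      else pvAGo cs k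

def get_rightmost_digit (string : String) : Int × Option Int :=
  pvAGo string.toList string.toList.length

-- ===== PORT B =====
def get_rightmost_digit_alt (string : String) : Int × Option Int :=
  match (PySem.List.enumerate string.toList 0).foldl
      (fun acc p => if PySem.Chars.isdigit p.2 then some p.1 else acc) none with
  | none => ((string.toList.length : Int), none)
  | some i => (i, (PySem.Int.ofChars? [PySem.List.pyGetD string.toList i ' ']).getD 0)

-- ===== PRECONDITION & SPEC =====
def Spec_get_rightmost_digit (string : String) (out : Int × Option Int) : Prop := out = get_rightmost_digit_alt string
instance (string : String) (out : Int × Option Int) : Decidable (Spec_get_rightmost_digit string out) := by unfold Spec_get_rightmost_digit; infer_instance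

-- ===== CLAIM (what is proved, stated in full; the proofs are below) =====
def Claim_equal_get_rightmost_digit : Prop := ∀ (string : String), Dom_get_rightmost_digit string → Spec_get_rightmost_digit string (get_rightmost_digit string)

-- ===== LEMMAS AND PROOFS =====

-- ===== VERDICT (by name: the statement is the Claim_ definition above) =====
-- rightmost digit index of a list (proof-side canonical form)
def lastDig : List Char → Option Nat
  | [] => none
  | c :: cs =>
      match lastDig cs with
      | some i => some (i + 1)
      | none => if PySem.Chars.isdigit c then some 0 else none

lemma lastDig_append_singleton (l : List Char) (c : Char) :
    lastDig (l ++ [c]) = if PySem.Chars.isdigit c then some l.length else lastDig l := by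
  induction l with
  | nil => simp [lastDig]
  | cons x l ih =>
      simp only [List.cons_append, lastDig, ih]
      by_cases h : PySem.Chars.isdigit c = true
      · simp [h]
      · simp [h]

lemma pvAGo_eq (cs : List Char) (n : Nat) (hn : n ≤ cs.length) :
    pvAGo cs n =
      match lastDig (cs.take n) with
      | none => ((cs.length : Int), none)
      | some i => ((i : Int), (PySem.Int.ofChars? [PySem.List.pyGetD cs (i : Int) ' ']).getD 0) := by
  induction n with
  | zero => simp [pvAGo, lastDig]
  | succ k ih =>
      have hk : k < cs.length := hn
      have htake : cs.take (k + 1) = cs.take k ++ [cs[k]] := by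
        rw [List.take_add_one, List.getElem?_eq_getElem hk]; rfl
      rw [pvAGo, htake, lastDig_append_singleton]
      have hget : PySem.List.pyGetD cs (k : Int) ' ' = cs[k] := by
        simp [PySem.List.pyGetD_natCast, List.getD_eq_getElem?_getD, List.getElem?_eq_getElem hk]
      by_cases h : PySem.Chars.isdigit (cs[k]) = true
      · simp [hget, h, List.length_take, Nat.min_eq_left (Nat.le_of_lt hk)]
      · simp only [hget, h]
        exact ih (Nat.le_of_lt hk)

lemma foldl_enumerate_last (cs : List Char) (s : Int) (acc : Option Int) :
    (PySem.List.enumerate cs s).foldl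
        (fun acc p => if PySem.Chars.isdigit p.2 then some p.1 else acc) acc =
      match lastDig cs with
      | none => acc
      | some i => some (s + (i : Int)) := by
  induction cs generalizing s acc with
  | nil => simp [PySem.List.enumerate, lastDig]
  | cons c cs ih =>
      rw [PySem.List.enumerate_cons, List.foldl_cons, ih]
      cases h : lastDig cs with
      | some i =>
          simp only [lastDig, h]
          congr 1
          push_cast
          ring
      | none =>
          simp only [lastDig, h]
          by_cases hd : PySem.Chars.isdigit c = true
          · simp [hd]
          · simp [hd]

theorem get_rightmost_digit_spec : Claim_equal_get_rightmost_digit := by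
  intro string _
  unfold Spec_get_rightmost_digit get_rightmost_digit get_rightmost_digit_alt
  rw [pvAGo_eq string.toList string.toList.length (le_refl _),
      foldl_enumerate_last string.toList 0 none]
  simp only [List.take_length]
  cases h : lastDig string.toList with
  | none => simp
  | some i => simp
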